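-- pv_equiv track=rewrite | github.com/artefactual/archivematica-storage-service | storage_service/locations/api/beta/remple/openapi.py | _get_api_version_slug
-- ===== SOURCE A (Python) =====
-- def _get_api_version_slug(version):
--     """Given a version number like 'X.Y.Z', return a slug representation of
--     it. E.g.,
--
--         >>> get_api_version_slug('3.0.0')
--         ... 'v3'
--         >>> get_api_version_slug('3.0.1')
--         ... 'v3_0_1'
--         >>> get_api_version_slug('3.0')
--         ... 'v3'
--         >>> get_api_version_slug('3.9')
--         ... 'v3_9'
--     """
--     parts = version.strip().split('.')
--     new_parts = []
--     for index, part in enumerate(parts):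
--         part_int = int(part)
--         if part_int:
--             new_parts.append(part)
--         else:
--             parts_to_right = parts[index + 1:]
--             non_empty_ptr = [p for p in parts_to_right if int(p)]
--             if non_empty_ptr:
--                 new_parts.append(part)
--     return 'v{}'.format('_'.join(new_parts))
-- ===== SOURCE B (Python) =====
-- def _get_api_version_slug(version):
--     """Single linear pass: record the index of the last segment whose int()
--     is nonzero, then keep the prefix up to (and including) that segment."""
--     parts = version.strip().split('.')
--     last = -1
--     for index, part in enumerate(parts):
--         if int(part):
--             last = index
--     return 'v{}'.format('_'.join(parts[:last + 1]))
-- ===== Notes on version B (the rewrite author's own statement) =====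
-- stated objective: simpler
-- what changed: Replaces A's per-zero rescan of all segments to the right with one linear pass that records the index of the last nonzero segment and keeps the prefix up to it.
import Mathlib
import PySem

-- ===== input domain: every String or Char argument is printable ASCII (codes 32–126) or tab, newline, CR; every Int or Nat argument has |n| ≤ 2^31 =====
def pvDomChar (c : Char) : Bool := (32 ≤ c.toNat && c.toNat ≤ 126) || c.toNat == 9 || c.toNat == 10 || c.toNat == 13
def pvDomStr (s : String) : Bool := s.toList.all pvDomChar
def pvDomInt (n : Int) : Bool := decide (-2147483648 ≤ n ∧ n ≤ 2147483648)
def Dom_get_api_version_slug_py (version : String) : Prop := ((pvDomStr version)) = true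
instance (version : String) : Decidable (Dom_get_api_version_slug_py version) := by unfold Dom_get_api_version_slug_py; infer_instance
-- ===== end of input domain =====

-- B replaces A's per-zero rescan of the segments to its right with one linear pass
-- recording the last nonzero segment's index (objective: simpler).

-- ===== PORT A =====
def get_api_version_slug_py (version : String) : String :=
  let parts := (PySem.Str.split? (PySem.Str.strip version) ".").getD []  -- sep "." ≠ "", so getD never fires
  let new_parts := (PySem.List.enumerate parts).foldl
    (fun new_parts ip =>
      let part := ip.2
      let part_int := (PySem.Int.ofStr? part).getD 0   -- Pre_ excludes inputs where int(part) raises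
      if part_int ≠ 0 then new_parts ++ [part]
      else
        let parts_to_right := PySem.List.slice parts (some (ip.1 + 1)) none
        let non_empty_ptr := parts_to_right.filter (fun p => (PySem.Int.ofStr? p).getD 0 ≠ 0)
        if non_empty_ptr ≠ [] then new_parts ++ [part] else new_parts) []
  "v" ++ PySem.Str.join "_" new_parts

-- ===== PORT B =====
def get_api_version_slug_py_alt (version : String) : String :=
  let parts := (PySem.Str.split? (PySem.Str.strip version) ".").getD []
  let last := (PySem.List.enumerate parts).foldl
    (fun last ip => if (PySem.Int.ofStr? ip.2).getD 0 ≠ 0 then ip.1 else last) (-1)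
  "v" ++ PySem.Str.join "_" (PySem.List.slice parts none (some (last + 1)))

-- ===== PRECONDITION & SPEC =====
-- Pre_ excludes exactly the inputs where Python A raises ValueError: some dot-separated segment
-- of the stripped version does not parse as a Python int.
def Pre_get_api_version_slug_py (version : String) : Prop :=
  ∀ p ∈ (PySem.Str.split? (PySem.Str.strip version) ".").getD [], (PySem.Int.ofStr? p).isSome
instance (version : String) : Decidable (Pre_get_api_version_slug_py version) := by unfold Pre_get_api_version_slug_py; infer_instance
def pvWitness_get_api_version_slug_py : String := "3.0.1"

def Spec_get_api_version_slug_py (version : String) (out : String) : Prop := out = get_api_version_slug_py_alt version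
instance (version : String) (out : String) : Decidable (Spec_get_api_version_slug_py version out) := by unfold Spec_get_api_version_slug_py; infer_instance

-- ===== CLAIM (what is proved, stated in full; the proofs are below) =====
def Claim_equal_get_api_version_slug_py : Prop := ∀ (version : String), Dom_get_api_version_slug_py version → Pre_get_api_version_slug_py version → Spec_get_api_version_slug_py version (get_api_version_slug_py version)

-- ===== LEMMAS AND PROOFS =====

-- nonzero test shared by both loop bodies
def pvNZ (p : String) : Bool := decide ((PySem.Int.ofStr? p).getD 0 ≠ 0)

-- the list A's loop accumulates, written structurally
def pvKeep : List String → List String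
  | [] => []
  | x :: xs => if pvNZ x || xs.any pvNZ then x :: pvKeep xs else pvKeep xs

-- index of the last pvNZ element (meaningful when l.any pvNZ)
def pvLast : List String → Nat
  | [] => 0
  | _ :: xs => if xs.any pvNZ then pvLast xs + 1 else 0

theorem pvAfold (parts : List String) : ∀ (l : List String) (k : Nat), parts.drop k = l →
    ∀ (acc : List String),
    (PySem.List.enumerate l (k : Int)).foldl
      (fun new_parts ip =>
        if (PySem.Int.ofStr? ip.2).getD 0 ≠ 0 then new_parts ++ [ip.2]
        else
          if (PySem.List.slice parts (some (ip.1 + 1)) none).filter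
              (fun p => (PySem.Int.ofStr? p).getD 0 ≠ 0) ≠ [] then new_parts ++ [ip.2]
          else new_parts) acc
    = acc ++ pvKeep l := by
  intro l
  induction l with
  | nil => intro k h acc; simp [PySem.List.enumerate, pvKeep]
  | cons x xs ih =>
    intro k h acc
    have hx : parts.drop (k + 1) = xs := by
      rw [← List.drop_drop, h, List.drop_one, List.tail_cons]
    rw [PySem.List.enumerate_cons, List.foldl_cons]
    have hcast : (k : Int) + 1 = ((k + 1 : Nat) : Int) := by push_cast; ring
    rw [hcast, ih (k + 1) hx]
    have hslice : PySem.List.slice parts (some ((k : Int) + 1)) none = xs := by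
      rw [hcast, PySem.List.slice_from parts (by positivity)]
      simpa using hx
    have hfil : (xs.filter (fun p => decide ((PySem.Int.ofStr? p).getD 0 ≠ 0)) ≠ []) ↔ xs.any pvNZ = true := by
      simp only [ne_eq, List.filter_eq_nil_iff, List.any_eq_true, pvNZ, decide_eq_true_eq, not_forall]
      tauto
    rw [← hcast, hslice]
    by_cases h1 : (PySem.Int.ofStr? x).getD 0 ≠ 0
    · rw [if_pos h1]
      simp [pvKeep, pvNZ, h1]
    · rw [if_neg h1]
      by_cases h2 : xs.any pvNZ
      · rw [if_pos (hfil.mpr h2)]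
        simp [pvKeep, h2]
      · rw [if_neg (fun hc => h2 (hfil.mp hc))]
        simp [pvKeep, pvNZ, h1, h2]

theorem pvBfold : ∀ (l : List String) (k : Nat) (acc : Int),
    (PySem.List.enumerate l (k : Int)).foldl
      (fun last ip => if (PySem.Int.ofStr? ip.2).getD 0 ≠ 0 then ip.1 else last) acc
    = if l.any pvNZ then ((k + pvLast l : Nat) : Int) else acc := by
  intro l
  induction l with
  | nil => intro k acc; simp [PySem.List.enumerate]
  | cons x xs ih =>
    intro k acc
    rw [PySem.List.enumerate_cons, List.foldl_cons]
    have hcast : (k : Int) + 1 = ((k + 1 : Nat) : Int) := by push_cast; ring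
    rw [hcast, ih (k + 1)]
    by_cases h2 : xs.any pvNZ
    · simp [h2, pvLast]
      ring
    · by_cases h1 : (PySem.Int.ofStr? x).getD 0 ≠ 0
      · simp [h1, h2, pvLast, pvNZ]
      · simp [h1, h2, pvNZ]

theorem pvKeep_eq_take : ∀ (l : List String),
    pvKeep l = if l.any pvNZ then l.take (pvLast l + 1) else [] := by
  intro l
  induction l with
  | nil => simp [pvKeep]
  | cons x xs ih =>
    by_cases h2 : xs.any pvNZ
    · simp [pvKeep, pvLast, h2, ih]
    · by_cases h1 : pvNZ x
      · simp [pvKeep, pvLast, h1, h2, ih]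
      · simp [pvKeep, h1, h2, ih]

-- ===== VERDICT (by name: the statement is the Claim_ definition above) =====
set_option maxHeartbeats 1000000 in
theorem get_api_version_slug_py_spec : Claim_equal_get_api_version_slug_py := by
  intro version _ _
  unfold Spec_get_api_version_slug_py get_api_version_slug_py get_api_version_slug_py_alt
  set parts := (PySem.Str.split? (PySem.Str.strip version) ".").getD [] with hparts
  dsimp only
  have ha := pvAfold parts parts 0 (by simp) []
  have hb := pvBfold parts 0 (-1)
  simp only [Nat.cast_zero, Nat.zero_add] at ha hb
  rw [ha, hb, pvKeep_eq_take, List.nil_append]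
  by_cases h2 : parts.any pvNZ
  · rw [if_pos h2, if_pos h2, PySem.List.slice_to parts (by omega)]
    congr 2
  · rw [if_neg h2, if_neg h2, show (-1 : Int) + 1 = 0 from by ring,
      PySem.List.slice_to parts le_rfl]
    simp
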